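-- pv_equiv track=rewrite | github.com/effaeff/gps-force-model | gpsforcemodel/dataprocessor.py | find_mid_peak
-- ===== SOURCE A (Python) =====
-- def find_mid_peak(array):
--     """Find index, which corresponds to the middle of a rect signal"""
--     cut = False
--     start_idx = 0
--     for idx, value in enumerate(array):
--         if value == 1 and not cut:
--             cut = True
--             start_idx = idx
--         elif value == 0 and cut:
--             return start_idx + (idx - start_idx) // 2
-- ===== SOURCE B (Python) =====
-- def find_mid_peak(array):
--     """Find index, which corresponds to the middle of a rect signal"""
--     if 1 not in array:
--         return None
--     start = array.index(1)
--     tail = array[start:]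
--     if 0 not in tail:
--         return None
--     end = start + tail.index(0)
--     return (start + end) // 2
-- ===== Notes on version B (the rewrite author's own statement) =====
-- stated objective: simpler
-- what changed: Replaces the stateful enumerate loop with a flag and running start index by two plain searches: list.index of the first 1, then index of the first 0 in the tail from there, returning (start+end)//2.
import Mathlib
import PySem

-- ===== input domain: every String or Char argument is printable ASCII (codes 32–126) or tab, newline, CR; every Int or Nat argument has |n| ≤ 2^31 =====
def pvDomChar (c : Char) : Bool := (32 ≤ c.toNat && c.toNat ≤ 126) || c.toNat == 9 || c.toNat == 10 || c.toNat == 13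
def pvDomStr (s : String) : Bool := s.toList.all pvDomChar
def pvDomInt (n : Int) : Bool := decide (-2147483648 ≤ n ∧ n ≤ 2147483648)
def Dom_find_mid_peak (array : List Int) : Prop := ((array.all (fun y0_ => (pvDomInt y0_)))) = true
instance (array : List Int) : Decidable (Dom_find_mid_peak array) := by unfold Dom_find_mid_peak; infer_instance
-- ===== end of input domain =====

-- B replaces A's stateful flag-and-accumulator loop by two index searches; objective: simpler.

-- ===== PORT A =====
-- for idx, value in enumerate(array) with state (cut, start_idx); implicit None at loop end
def find_mid_peak_loop (xs : List Int) (idx : Int) (cut : Bool) (start_idx : Int) : Option Int :=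
  match xs with
  | [] => none
  | v :: rest =>
    if v = 1 ∧ cut = false then find_mid_peak_loop rest (idx + 1) true idx
    else if v = 0 ∧ cut = true then some (start_idx + PySem.Int.floordiv (idx - start_idx) 2)
    else find_mid_peak_loop rest (idx + 1) cut start_idx

def find_mid_peak (array : List Int) : Option Int :=
  find_mid_peak_loop array 0 false 0

-- ===== PORT B =====
def find_mid_peak_alt (array : List Int) : Option Int :=
  match PySem.List.index? array 1 with
  | none => none
  | some start =>
    let tail := PySem.List.slice array (some (start : Int)) none
    match PySem.List.index? tail 0 with
    | none => none
    | some t =>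
      let endIdx : Int := (start : Int) + (t : Int)
      some (PySem.Int.floordiv ((start : Int) + endIdx) 2)

-- ===== PRECONDITION & SPEC =====
def Spec_find_mid_peak (array : List Int) (out : Option Int) : Prop := out = find_mid_peak_alt array
instance (array : List Int) (out : Option Int) : Decidable (Spec_find_mid_peak array out) := by unfold Spec_find_mid_peak; infer_instance

-- ===== CLAIM (what is proved, stated in full; the proofs are below) =====
def Claim_equal_find_mid_peak : Prop := ∀ (array : List Int), Dom_find_mid_peak array → Spec_find_mid_peak array (find_mid_peak array)

-- ===== LEMMAS AND PROOFS =====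

-- A's loop after the 1 was seen: first 0 from here decides the result
theorem loop_true (xs : List Int) (idx s : Int) :
    find_mid_peak_loop xs idx true s =
      match PySem.List.index? xs 0 with
      | none => none
      | some e => some (s + PySem.Int.floordiv (idx + (e : Int) - s) 2) := by
  induction xs generalizing idx with
  | nil => simp [find_mid_peak_loop, PySem.List.index?]
  | cons v rest ih =>
    by_cases hv : v = 0
    · subst hv
      rw [find_mid_peak_loop, PySem.List.index?_cons_self]
      simp
    · rw [find_mid_peak_loop, PySem.List.index?_cons_of_ne _ hv, ih (idx + 1)]
      rw [if_neg (by simp), if_neg (by simp [hv])]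
      cases PySem.List.index? rest 0 with
      | none => rfl
      | some e =>
        simp only [Option.map_some]
        congr 2
        push_cast
        ring

-- A's loop before the 1 was seen: first 1 from here sets start and flips the flag
theorem loop_false (xs : List Int) (idx s : Int) :
    find_mid_peak_loop xs idx false s =
      match PySem.List.index? xs 1 with
      | none => none
      | some k => find_mid_peak_loop (xs.drop (k + 1)) (idx + (k : Int) + 1) true (idx + (k : Int)) := by
  induction xs generalizing idx with
  | nil => simp [find_mid_peak_loop, PySem.List.index?]
  | cons v rest ih =>
    by_cases hv : v = 1
    · subst hv
      rw [find_mid_peak_loop, PySem.List.index?_cons_self]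
      simp
    · rw [find_mid_peak_loop, PySem.List.index?_cons_of_ne _ hv, ih (idx + 1)]
      rw [if_neg (by simp [hv]), if_neg (by simp)]
      cases PySem.List.index? rest 1 with
      | none => rfl
      | some k =>
        simp only [Option.map_some, List.drop_succ_cons]
        congr 1 <;> first | rfl | (push_cast; ring)

theorem find_mid_peak_spec' (array : List Int) :
    find_mid_peak array = find_mid_peak_alt array := by
  unfold find_mid_peak find_mid_peak_alt
  rw [loop_false]
  cases hs : PySem.List.index? array 1 with
  | none => rfl
  | some s =>
    dsimp only
    obtain ⟨hslen, hsv, -⟩ := PySem.List.getElem_of_index?_eq_some hs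
    rw [PySem.List.slice_from_natCast, List.drop_eq_getElem_cons hslen, hsv,
        PySem.List.index?_cons_of_ne _ (by norm_num), loop_true]
    cases PySem.List.index? (array.drop (s + 1)) 0 with
    | none => rfl
    | some e =>
      simp only [Option.map_some]
      congr 1
      rw [PySem.Int.floordiv_eq_ediv_of_pos (by norm_num),
          PySem.Int.floordiv_eq_ediv_of_pos (by norm_num)]
      push_cast
      omega

-- ===== VERDICT (by name: the statement is the Claim_ definition above) =====
theorem find_mid_peak_spec : Claim_equal_find_mid_peak := by
  intro array _
  exact find_mid_peak_spec' array
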